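-- pv_equiv track=rewrite | github.com/plouiserre/katas | GameOfLife/tests/test_b.py | locate_me
-- ===== SOURCE A (Python) =====
-- def locate_me(cell_position, grid) :
--     coordonnates = []
--     for i, line in enumerate(grid) :
--         for j, column in enumerate(line) :
--             if cell_position == 0 :
--                 coordonnates.append(i)
--                 coordonnates.append(j)
--                 break
--             else :
--                 cell_position =cell_position - 1
--         if cell_position == 0 :
--             break
--     return coordonnates
-- ===== SOURCE B (Python) =====
-- def locate_me(cell_position, grid):
--     # Prefix-sum of row lengths: O(rows) instead of O(cell_position) cell-by-cell countdown.
--     if cell_position < 0: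
--         return []
--     offset = 0
--     for i, line in enumerate(grid):
--         if cell_position < offset + len(line):
--             return [i, cell_position - offset]
--         offset += len(line)
--     return []
-- ===== Notes on version B (the rewrite author's own statement) =====
-- stated objective: faster
-- what changed: B accumulates row lengths (prefix sums) and locates the containing row with one comparison per row, instead of decrementing the index once per cell through nested loops; B also returns the correct coordinates when the index falls on a row boundary, where A's misplaced break returns [].
-- intended difference: On in-range indices that equal the total length of a nonempty prefix of rows (the target cell is the first cell of a later row), A's outer-loop break fires before the cell is visited and A returns [], while B returns the correct [row, col], which is the intended coordinate of that cell. — e.g. on locate_me(2, [[1, 2], [3, 4]]): A returns [], B returns [1, 0]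
import Mathlib
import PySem

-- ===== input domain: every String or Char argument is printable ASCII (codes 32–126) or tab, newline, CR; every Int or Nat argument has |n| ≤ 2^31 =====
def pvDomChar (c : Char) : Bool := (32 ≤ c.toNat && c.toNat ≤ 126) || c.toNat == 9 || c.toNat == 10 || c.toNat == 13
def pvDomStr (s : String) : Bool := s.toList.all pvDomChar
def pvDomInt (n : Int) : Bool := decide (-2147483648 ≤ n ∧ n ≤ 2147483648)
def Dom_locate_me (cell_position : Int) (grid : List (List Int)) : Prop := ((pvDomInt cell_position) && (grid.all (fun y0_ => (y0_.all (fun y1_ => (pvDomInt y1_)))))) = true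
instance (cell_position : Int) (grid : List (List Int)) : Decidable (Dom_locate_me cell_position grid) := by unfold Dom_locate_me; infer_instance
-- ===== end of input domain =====

-- B replaces A's per-cell countdown with a per-row prefix-sum scan (O(rows) vs O(cell_position))
-- and returns the correct coordinates on row boundaries where A's misplaced break returns [].

-- ===== PORT A =====
-- inner 'for j, column in enumerate(line)': returns (cell_position after the loop, appended coords)
def locateInner (cell_position : Int) (i : Int) (j : Int) (line : List Int) : Int × List Int :=
  match line with
  | [] => (cell_position, [])
  | _ :: rest =>
    if cell_position == 0 then (cell_position, [i, j])
    else locateInner (cell_position - 1) i (j + 1) rest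

-- outer 'for i, line in enumerate(grid)' with the trailing 'if cell_position == 0: break'
def locateOuter (cell_position : Int) (i : Int) (grid : List (List Int)) : List Int :=
  match grid with
  | [] => []
  | line :: rest =>
    let r := locateInner cell_position i 0 line
    if r.1 == 0 then r.2 else locateOuter r.1 (i + 1) rest

def locate_me (cell_position : Int) (grid : List (List Int)) : List Int :=
  locateOuter cell_position 0 grid

-- ===== PORT B =====
def locate_me_alt_go (cell_position : Int) (offset : Int) (i : Int) (grid : List (List Int)) : List Int :=
  match grid with
  | [] => []
  | line :: rest =>
    if cell_position < offset + (line.length : Int) then [i, cell_position - offset]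
    else locate_me_alt_go cell_position (offset + (line.length : Int)) (i + 1) rest

def locate_me_alt (cell_position : Int) (grid : List (List Int)) : List Int :=
  if cell_position < 0 then [] else locate_me_alt_go cell_position 0 0 grid

-- ===== PRECONDITION & SPEC =====
-- sum of the lengths of the first m rows / of all rows
def prefN (grid : List (List Int)) (m : Nat) : Nat := ((grid.take m).map List.length).sum
def totalN (grid : List (List Int)) : Nat := (grid.map List.length).sum

-- On in-range indices equal to the total length of a nonempty prefix of rows (the target cell is
-- the first cell of a later row) A's outer-loop break fires before that cell is visited and A
-- returns [], while B returns the intended coordinates [row, col] of that cell.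
def D_locate_me (cell_position : Int) (grid : List (List Int)) : Prop :=
  0 ≤ cell_position ∧ cell_position < (totalN grid : Int) ∧
    ∃ m, m < grid.length ∧ (prefN grid (m + 1) : Int) = cell_position
instance (cell_position : Int) (grid : List (List Int)) : Decidable (D_locate_me cell_position grid) := by
  unfold D_locate_me; infer_instance

def Spec_locate_me (cell_position : Int) (grid : List (List Int)) (out : List Int) : Prop :=
  ¬ D_locate_me cell_position grid → out = locate_me_alt cell_position grid
instance (cell_position : Int) (grid : List (List Int)) (out : List Int) : Decidable (Spec_locate_me cell_position grid out) := by
  unfold Spec_locate_me; infer_instance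

def pvDiffWitness_locate_me : Int × List (List Int) := (2, [[1, 2], [3, 4]])
def pvDiffWitnessOut_locate_me : (List Int) × (List Int) := ([], [1, 0])

-- ===== CLAIM (what is proved, stated in full; the proofs are below) =====
def Claim_unchanged_locate_me : Prop := ∀ (cell_position : Int) (grid : List (List Int)), Dom_locate_me cell_position grid → Spec_locate_me cell_position grid (locate_me cell_position grid)
def Claim_changed_locate_me : Prop := Dom_locate_me (pvDiffWitness_locate_me.1) (pvDiffWitness_locate_me.2) ∧ D_locate_me (pvDiffWitness_locate_me.1) (pvDiffWitness_locate_me.2) ∧ locate_me (pvDiffWitness_locate_me.1) (pvDiffWitness_locate_me.2) = pvDiffWitnessOut_locate_me.1 ∧ locate_me_alt (pvDiffWitness_locate_me.1) (pvDiffWitness_locate_me.2) = pvDiffWitnessOut_locate_me.2 ∧ pvDiffWitnessOut_locate_me.1 ≠ pvDiffWitnessOut_locate_me.2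
def Claim_exact_locate_me : Prop := ∀ (cell_position : Int) (grid : List (List Int)), Dom_locate_me cell_position grid → D_locate_me cell_position grid → locate_me cell_position grid ≠ locate_me_alt cell_position grid

-- ===== LEMMAS AND PROOFS =====

-- proof-only reformulation of B's scan in terms of the remaining index rem = cell_position - offset
def goR (rem : Int) (i : Int) (grid : List (List Int)) : List Int :=
  match grid with
  | [] => []
  | line :: rest =>
    if rem < (line.length : Int) then [i, rem] else goR (rem - line.length) (i + 1) rest

lemma prefN_cons_succ (line : List Int) (rest : List (List Int)) (m : Nat) :
    prefN (line :: rest) (m + 1) = line.length + prefN rest m := by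
  simp [prefN]

lemma totalN_cons (line : List Int) (rest : List (List Int)) :
    totalN (line :: rest) = line.length + totalN rest := by
  simp [totalN]

lemma go_eq_goR (grid : List (List Int)) : ∀ k offset i : Int,
    locate_me_alt_go k offset i grid = goR (k - offset) i grid := by
  induction grid with
  | nil => intro k offset i; rfl
  | cons line rest ih =>
    intro k offset i
    simp only [locate_me_alt_go, goR]
    by_cases h : k - offset < (line.length : Int)
    · rw [if_pos (by omega), if_pos h]
    · rw [if_neg (by omega), if_neg h, ih]
      have : k - (offset + (line.length : Int)) = k - offset - (line.length : Int) := by ring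
      rw [this]

lemma inner_lt (line : List Int) : ∀ pos i j : Int, 0 ≤ pos → pos < (line.length : Int) →
    locateInner pos i j line = (0, [i, j + pos]) := by
  induction line with
  | nil => intro pos i j h0 h1; simp at h1; omega
  | cons c rest ih =>
    intro pos i j h0 h1
    simp only [locateInner, beq_iff_eq]
    by_cases hp : pos = 0
    · rw [if_pos hp]; simp [hp]
    · rw [if_neg hp, ih (pos - 1) i (j + 1) (by omega) (by simp at h1 ⊢; omega)]
      have : j + 1 + (pos - 1) = j + pos := by ring
      rw [this]

lemma inner_ge (line : List Int) : ∀ pos i j : Int, pos < 0 ∨ (line.length : Int) ≤ pos →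
    locateInner pos i j line = (pos - line.length, []) := by
  induction line with
  | nil => intro pos i j _; simp [locateInner]
  | cons c rest ih =>
    intro pos i j h
    have hp : pos ≠ 0 := by simp at h; omega
    simp only [locateInner, beq_iff_eq, if_neg hp]
    rw [ih (pos - 1) i (j + 1) (by simp at h ⊢; omega)]
    have : pos - 1 - (rest.length : Int) = pos - ((c :: rest).length : Int) := by
      simp; ring
    rw [this]

lemma outer_neg (grid : List (List Int)) : ∀ rem i : Int, rem < 0 →
    locateOuter rem i grid = [] := by
  induction grid with
  | nil => intro rem i _; rfl
  | cons line rest ih =>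
    intro rem i h
    simp only [locateOuter, inner_ge line rem i 0 (Or.inl h)]
    rw [if_neg (by simp; omega)]
    exact ih _ _ (by omega)

lemma goR_zero_total (grid : List (List Int)) : ∀ rem i : Int, totalN grid = 0 → 0 ≤ rem →
    goR rem i grid = [] := by
  induction grid with
  | nil => intro rem i _ _; rfl
  | cons line rest ih =>
    intro rem i h h0
    rw [totalN_cons] at h
    have hl : line.length = 0 := by omega
    simp only [goR, hl]
    rw [if_neg (by push_cast; omega)]
    exact ih _ _ (by omega) (by push_cast [hl]; omega)

lemma outer_eq_goR (grid : List (List Int)) : ∀ rem i : Int, 0 ≤ rem →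
    (∀ m, m < grid.length → (prefN grid (m + 1) : Int) = rem → (totalN grid : Int) ≤ rem) →
    locateOuter rem i grid = goR rem i grid := by
  induction grid with
  | nil => intro rem i _ _; rfl
  | cons line rest ih =>
    intro rem i h0 H
    by_cases h1 : rem < (line.length : Int)
    · simp only [locateOuter, goR, inner_lt line rem i 0 h0 h1]
      rw [if_pos (by simp), if_pos h1]
      simp
    · have hr := inner_ge line rem i 0 (Or.inr (by omega))
      simp only [locateOuter, goR, hr]
      rw [if_neg h1]
      by_cases he : rem = (line.length : Int)
      · rw [if_pos (by simp; omega)]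
        have h2 : (totalN (line :: rest) : Int) ≤ rem := by
          apply H 0 (by simp)
          rw [prefN_cons_succ]; simp [prefN]; omega
        rw [totalN_cons] at h2
        have ht : totalN rest = 0 := by push_cast at h2; omega
        exact (goR_zero_total rest (rem - line.length) (i + 1) ht (by omega)).symm
      · rw [if_neg (by simp; omega)]
        apply ih _ _ (by omega)
        intro m hm hpm
        have := H (m + 1) (by simp; omega) (by rw [prefN_cons_succ]; push_cast at hpm ⊢; omega)
        rw [totalN_cons] at this
        push_cast at this ⊢
        omega

lemma outer_boundary (grid : List (List Int)) : ∀ rem i : Int, 0 ≤ rem →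
    (∃ m, m < grid.length ∧ (prefN grid (m + 1) : Int) = rem) →
    locateOuter rem i grid = [] := by
  induction grid with
  | nil => intro rem i _ h; obtain ⟨m, hm, _⟩ := h; simp at hm
  | cons line rest ih =>
    intro rem i h0 h
    obtain ⟨m, hm, heq⟩ := h
    have hd : prefN (line :: rest) (m + 1) = line.length + prefN rest m := prefN_cons_succ _ _ _
    have hge : (line.length : Int) ≤ rem := by rw [hd] at heq; push_cast at heq; omega
    have hr := inner_ge line rem i 0 (Or.inr hge)
    simp only [locateOuter, hr]
    by_cases he : rem = (line.length : Int)
    · rw [if_pos (by simp; omega)]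
    · rw [if_neg (by simp; omega)]
      apply ih _ _ (by omega)
      have hm1 : m ≠ 0 := by
        intro h'; subst h'
        rw [hd] at heq; simp [prefN] at heq; omega
      refine ⟨m - 1, by simp at hm; omega, ?_⟩
      have : m - 1 + 1 = m := by omega
      rw [this]
      rw [hd] at heq; push_cast at heq ⊢; omega

lemma goR_ne_nil (grid : List (List Int)) : ∀ rem i : Int, 0 ≤ rem → rem < (totalN grid : Int) →
    goR rem i grid ≠ [] := by
  induction grid with
  | nil => intro rem i h0 h1; simp [totalN] at h1; omega
  | cons line rest ih =>
    intro rem i h0 h1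
    simp only [goR]
    by_cases h : rem < (line.length : Int)
    · rw [if_pos h]; simp
    · rw [if_neg h]
      apply ih _ _ (by omega)
      rw [totalN_cons] at h1; push_cast at h1 ⊢; omega

-- ===== VERDICT (by name: the statement is the Claim_ definition above) =====
theorem locate_me_spec : Claim_unchanged_locate_me := by
  intro k grid _ hnd
  by_cases hk : k < 0
  · unfold locate_me locate_me_alt
    rw [if_pos hk, outer_neg grid k 0 hk]
  · have h0 : 0 ≤ k := by omega
    unfold locate_me locate_me_alt
    rw [if_neg hk, go_eq_goR]
    have hz : k - 0 = k := by ring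
    rw [hz]
    apply outer_eq_goR grid k 0 h0
    intro m hm hpm
    by_cases ht : k < (totalN grid : Int)
    · exact absurd ⟨h0, ht, m, hm, hpm⟩ hnd
    · omega

theorem locate_me_changed : Claim_changed_locate_me := by
  unfold Claim_changed_locate_me; decide

theorem locate_me_tight : Claim_exact_locate_me := by
  intro k grid _ hd
  obtain ⟨h0, ht, hb⟩ := hd
  have ha : locate_me k grid = [] := outer_boundary grid k 0 h0 hb
  have hbne : locate_me_alt k grid ≠ [] := by
    unfold locate_me_alt
    rw [if_neg (by omega), go_eq_goR]
    have hz : k - 0 = k := by ring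
    rw [hz]
    exact goR_ne_nil grid k 0 h0 ht
  rw [ha]
  exact fun h => hbne h.symm
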